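-- pv_equiv track=rewrite | github.com/doremon020848/Code | manobe/HW08_3.py | patterned_message
-- ===== SOURCE A (Python) =====
-- def patterned_message(message,pattern,ans=''):
--     f1 = message.replace(' ','')
--     if len(pattern) != 0:
--         if pattern[0] == '*':
--             f2 = f1[0]
--             f3 = patterned_message(f1[1:] + f1[0],pattern[1:],f2)
--         elif pattern[0] == ' ':
--             f2 = ' '
--             f3 = patterned_message(f1,pattern[1:],f2)
--         else:
--             f2 = '\n'
--             f3 = patterned_message(f1,pattern[1:],f2)
--         return ans + f3
--     else:
--         return ans
-- ===== SOURCE B (Python) =====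
-- def patterned_message(message, pattern, ans=''):
--     stripped = message.replace(' ', '')
--     out = []
--     idx = 0
--     for p in pattern:
--         if p == '*':
--             if idx >= len(stripped):
--                 idx = 0
--             out.append(stripped[idx])
--             idx += 1
--         elif p == ' ':
--             out.append(' ')
--         else:
--             out.append('\n')
--     return ans + ''.join(out)
-- ===== Notes on version B (the rewrite author's own statement) =====
-- stated objective: faster
-- what changed: Replaced A's recursion that re-strips the message and rotates the whole stripped string at every '*' step with a single loop over the pattern keeping a cyclic integer cursor into the once-stripped message and an output list joined at the end.
import Mathlib
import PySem

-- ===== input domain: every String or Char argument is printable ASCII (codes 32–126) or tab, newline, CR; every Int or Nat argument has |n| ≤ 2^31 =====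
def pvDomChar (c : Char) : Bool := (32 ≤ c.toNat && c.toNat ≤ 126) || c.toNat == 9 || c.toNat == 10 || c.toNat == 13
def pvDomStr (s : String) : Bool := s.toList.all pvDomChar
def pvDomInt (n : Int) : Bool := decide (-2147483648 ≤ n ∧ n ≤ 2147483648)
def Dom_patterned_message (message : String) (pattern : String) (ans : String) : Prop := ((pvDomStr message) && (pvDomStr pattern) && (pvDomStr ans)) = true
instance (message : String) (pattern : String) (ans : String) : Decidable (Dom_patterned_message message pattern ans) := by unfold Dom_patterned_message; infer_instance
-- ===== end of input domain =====

-- B replaces A's per-'*' whole-string rotation and recursion by one pass over the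
-- pattern with a cyclic cursor into the once-stripped message (objective: faster).
-- Pre_ excludes exactly the inputs where both Pythons raise IndexError.

-- ===== PORT A =====
-- message.replace(' ','') removes every space: exact as a filter on the char list.
def pvNotSpace (c : Char) : Bool := c ≠ ' '

-- f1[0] is pyGet?; Python raises IndexError when f1 is empty — excluded by Pre_,
-- the port substitutes ' ' there (never reached under Pre_).
def pmAux (message : List Char) (pattern : List Char) (ans : List Char) : List Char :=
  match pattern with
  | [] => ans
  | p :: rest =>
    if p = '*' then
      -- f2 = f1[0]; f3 = recursive call on f1[1:] + f1[0] with ans = f2; return ans + f3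
      ans ++ pmAux ((List.filter pvNotSpace message).drop 1 ++
                      [(PySem.List.pyGet? (List.filter pvNotSpace message) 0).getD ' '])
                   rest [(PySem.List.pyGet? (List.filter pvNotSpace message) 0).getD ' ']
    else if p = ' ' then
      ans ++ pmAux (List.filter pvNotSpace message) rest [' ']
    else
      ans ++ pmAux (List.filter pvNotSpace message) rest ['\n']

def patterned_message (message : String) (pattern : String) (ans : String) : String :=
  String.ofList (pmAux message.toList pattern.toList ans.toList)

-- ===== PORT B =====
-- Source B's loop over the pattern, transcribed as structural recursion over the pattern
-- carrying the cursor idx; stripped[idx] via getD (in range whenever B's Python returns).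
def pmLoop (stripped : List Char) (pattern : List Char) (idx : Nat) : List Char :=
  match pattern with
  | [] => []
  | p :: rest =>
    if p = '*' then
      stripped.getD (if stripped.length ≤ idx then 0 else idx) ' ' ::
        pmLoop stripped rest ((if stripped.length ≤ idx then 0 else idx) + 1)
    else if p = ' ' then
      ' ' :: pmLoop stripped rest idx
    else
      '\n' :: pmLoop stripped rest idx

def patterned_message_alt (message : String) (pattern : String) (ans : String) : String :=
  String.ofList (ans.toList ++ pmLoop (List.filter pvNotSpace message.toList) pattern.toList 0)

-- ===== PRECONDITION & SPEC =====
-- Pre_ excludes exactly the inputs where Python A raises IndexError: the space-stripped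
-- message is empty while the pattern contains '*' (B raises IndexError there too).
def Pre_patterned_message (message : String) (pattern : String) (ans : String) : Prop :=
  List.filter pvNotSpace message.toList ≠ [] ∨ '*' ∉ pattern.toList
instance (message : String) (pattern : String) (ans : String) : Decidable (Pre_patterned_message message pattern ans) := by unfold Pre_patterned_message; infer_instance

def pvWitness_patterned_message : String × String × String := ("ab c", "** * \n*", "hi")

def Spec_patterned_message (message : String) (pattern : String) (ans : String) (out : String) : Prop := out = patterned_message_alt message pattern ans
instance (message : String) (pattern : String) (ans : String) (out : String) : Decidable (Spec_patterned_message message pattern ans out) := by unfold Spec_patterned_message; infer_instance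

-- ===== CLAIM (what is proved, stated in full; the proofs are below) =====
def Claim_equal_patterned_message : Prop := ∀ (message : String) (pattern : String) (ans : String), Dom_patterned_message message pattern ans → Pre_patterned_message message pattern ans → Spec_patterned_message message pattern ans (patterned_message message pattern ans)

-- ===== LEMMAS AND PROOFS =====

-- A's accumulator is just prepended to the rest of the output.
theorem pmAux_acc (message pattern ans : List Char) :
    pmAux message pattern ans = ans ++ pmAux message pattern [] := by
  cases pattern with
  | nil => simp [pmAux]
  | cons p rest => simp only [pmAux]; split_ifs <;> simp

-- A re-strips its message at every level; stripping is idempotent.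
theorem pmAux_filter (message pattern : List Char) (ans : List Char) :
    pmAux (List.filter pvNotSpace message) pattern ans = pmAux message pattern ans := by
  cases pattern with
  | nil => rfl
  | cons p rest => simp only [pmAux, List.filter_filter, Bool.and_self]

-- Main invariant: A on the j-times-rotated stripped string equals B's loop at cursor j.
theorem pmAux_eq_pmLoop (pattern : List Char) : ∀ (s : List Char) (i : Nat),
    (∀ c ∈ s, pvNotSpace c = true) → i ≤ s.length → (s ≠ [] ∨ '*' ∉ pattern) →
    pmAux (s.drop i ++ s.take i) pattern [] = pmLoop s pattern i := by
  induction pattern with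
  | nil => intro s i _ _ _; rfl
  | cons p rest ih =>
    intro s i hs hi hpre
    have hpre' : s ≠ [] ∨ '*' ∉ rest := by
      rcases hpre with h | h
      · exact Or.inl h
      · exact Or.inr (fun hm => h (List.mem_cons_of_mem _ hm))
    have hfilt : ∀ j : Nat, List.filter pvNotSpace (s.drop j ++ s.take j) = s.drop j ++ s.take j := by
      intro j
      refine List.filter_eq_self.mpr ?_
      intro c hc
      rcases List.mem_append.mp hc with h | h
      · exact hs c (List.mem_of_mem_drop h)
      · exact hs c (List.mem_of_mem_take h)
    by_cases hp : p = '*'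
    · subst hp
      have hsne : s ≠ [] := by
        rcases hpre with h | h
        · exact h
        · exact absurd (List.mem_cons_self) h
      -- normalized cursor
      have hjlt : (if s.length ≤ i then 0 else i) < s.length := by
        have : 0 < s.length := List.length_pos_iff.mpr hsne
        split <;> omega
      set j : Nat := if s.length ≤ i then 0 else i with hj
      have hrot : s.drop i ++ s.take i = s.drop j ++ s.take j := by
        rw [hj]
        split
        · have : i = s.length := le_antisymm hi (by assumption)
          simp [this]
        · rfl
      have hcons : s.drop j ++ s.take j = s[j] :: (s.drop (j + 1) ++ s.take j) := by
        rw [List.drop_eq_getElem_cons hjlt, List.cons_append]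
      simp only [pmAux, pmLoop, hrot, hfilt j, reduceIte]
      rw [hcons, PySem.List.pyGet?_zero_cons]
      simp only [Option.getD_some]
      have htake : s.take (j + 1) = s.take j ++ [s[j]] := by
        rw [List.take_add_one, List.getElem?_eq_getElem hjlt]; rfl
      have hrec : (s[j] :: (s.drop (j + 1) ++ s.take j)).drop 1 ++ [s[j]]
          = s.drop (j + 1) ++ s.take (j + 1) := by
        rw [List.drop_succ_cons, List.drop_zero, htake, List.append_assoc]
      rw [hrec, pmAux_acc, ih s (j + 1) hs (by omega) (Or.inl hsne)]
      simp [← hj, List.getElem?_eq_getElem hjlt]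
    · by_cases hsp : p = ' '
      · subst hsp
        simp only [pmAux, pmLoop, hfilt i, if_neg hp, reduceIte]
        rw [pmAux_acc, ih s i hs hi hpre']
        simp
      · simp only [pmAux, pmLoop, if_neg hp, if_neg hsp]
        rw [hfilt i, pmAux_acc, ih s i hs hi hpre']
        simp

-- ===== VERDICT (by name: the statement is the Claim_ definition above) =====
theorem patterned_message_spec : Claim_equal_patterned_message := by
  intro message pattern ans _ hpre
  unfold Spec_patterned_message patterned_message patterned_message_alt
  have hnos : ∀ c ∈ List.filter pvNotSpace message.toList, pvNotSpace c = true := by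
    intro c hc; exact List.of_mem_filter hc
  have h0 : pmAux message.toList pattern.toList ans.toList
      = ans.toList ++ pmLoop (List.filter pvNotSpace message.toList) pattern.toList 0 := by
    rw [pmAux_acc]
    congr 1
    calc pmAux message.toList pattern.toList []
        = pmAux (List.filter pvNotSpace message.toList) pattern.toList [] :=
          (pmAux_filter message.toList pattern.toList []).symm
      _ = pmAux ((List.filter pvNotSpace message.toList).drop 0 ++
            (List.filter pvNotSpace message.toList).take 0) pattern.toList [] := by simp
      _ = pmLoop (List.filter pvNotSpace message.toList) pattern.toList 0 :=
          pmAux_eq_pmLoop pattern.toList _ 0 hnos (by omega) hpre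
  rw [h0]
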